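-- pv_equiv track=rewrite | github.com/Westc13/algorithm-practices | 1674-minimum-operations-to-make-array-equal/minimum-operations-to-make-array-equal.py | minOperations
-- ===== SOURCE A (Python) =====
-- def minOperations(n: int) -> int:
--     # return (n // 2) * ((n + 1) // 2)
--
--     arr = [(2 * i) + 1 for i in range(n)]
--     target = n
--     ops = 0
--
--     for num in arr:
--         if num < target:
--             ops += target - num
--     return ops
-- ===== SOURCE B (Python) =====
-- def minOperations(n: int) -> int:
--     if n <= 0:
--         return 0
--     return (n // 2) * ((n + 1) // 2)
-- ===== Notes on version B (the rewrite author's own statement) =====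
-- stated objective: faster
-- what changed: replaced the O(n) list build plus loop by the closed-form product (n//2)*((n+1)//2)
import Mathlib
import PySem

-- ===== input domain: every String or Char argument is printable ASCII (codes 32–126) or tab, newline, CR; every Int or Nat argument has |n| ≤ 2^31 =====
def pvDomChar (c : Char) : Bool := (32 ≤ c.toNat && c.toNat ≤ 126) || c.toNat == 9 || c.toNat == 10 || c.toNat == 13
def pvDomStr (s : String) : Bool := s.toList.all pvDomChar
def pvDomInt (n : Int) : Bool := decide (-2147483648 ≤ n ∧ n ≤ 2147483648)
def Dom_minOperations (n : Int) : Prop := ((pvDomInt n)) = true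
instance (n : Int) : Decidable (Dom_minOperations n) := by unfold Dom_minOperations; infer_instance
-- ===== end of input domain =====

-- B replaces A's O(n) array build and loop by the closed-form product (n//2)*((n+1)//2) (0 for n ≤ 0): faster.

-- ===== PORT A =====
def minOperations (n : Int) : Int :=
  let arr := (PySem.List.pyRange 0 n 1).map (fun i => 2 * i + 1)
  let target := n
  arr.foldl (fun ops num => if num < target then ops + (target - num) else ops) 0

-- ===== PORT B =====
def minOperations_alt (n : Int) : Int :=
  if n ≤ 0 then 0
  else PySem.Int.floordiv n 2 * PySem.Int.floordiv (n + 1) 2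

-- ===== PRECONDITION & SPEC =====
def Spec_minOperations (n : Int) (out : Int) : Prop := out = minOperations_alt n
instance (n : Int) (out : Int) : Decidable (Spec_minOperations n out) := by unfold Spec_minOperations; infer_instance

-- ===== CLAIM (what is proved, stated in full; the proofs are below) =====
def Claim_equal_minOperations : Prop := ∀ (n : Int), Dom_minOperations n → Spec_minOperations n (minOperations n)

-- ===== LEMMAS AND PROOFS =====

-- bracket facts for floor division by 2
theorem pv_fd2 (t : Int) : 2 * PySem.Int.floordiv t 2 ≤ t ∧ t < 2 * PySem.Int.floordiv t 2 + 2 := by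
  have h := PySem.Int.floordiv_mul_add_mod t 2
  have hm := PySem.Int.mod_nonneg (a := t) (b := 2) (by norm_num)
  have hm2 := PySem.Int.mod_lt (a := t) (b := 2) (by norm_num)
  omega

-- the loop over range(m) with a fixed target t, in closed form
theorem pv_loop (t : Int) (m : Nat) :
    ((PySem.List.pyRange 0 m 1).map (fun i => 2 * i + 1)).foldl
      (fun ops num => if num < t then ops + (t - num) else ops) 0
    = min (m : Int) (max 0 (PySem.Int.floordiv t 2)) * t
      - min (m : Int) (max 0 (PySem.Int.floordiv t 2)) ^ 2 := by
  induction m with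
  | zero =>
      simp [PySem.List.pyRange_one_eq_nil (a := 0) (b := 0) le_rfl]
  | succ m ih =>
      have hcast : ((m : Int) + 1) = ((m + 1 : Nat) : Int) := by push_cast; ring
      have hsplit := PySem.List.pyRange_one_succ_right (a := 0) (b := (m : Int))
        (by exact_mod_cast Int.natCast_nonneg m)
      rw [← hcast, hsplit, List.map_append, List.foldl_append, ih]
      obtain ⟨h1, h2⟩ := pv_fd2 t
      by_cases hlt : 2 * (m : Int) + 1 < t
      · have hk : min (m : Int) (max 0 (PySem.Int.floordiv t 2)) = (m : Int) := by omega
        have hk' : min ((m : Int) + 1) (max 0 (PySem.Int.floordiv t 2)) = (m : Int) + 1 := by omega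
        simp only [List.map_cons, List.map_nil, List.foldl_cons, List.foldl_nil, if_pos hlt, hk, hk']
        ring
      · have hk' : min ((m : Int) + 1) (max 0 (PySem.Int.floordiv t 2))
            = min (m : Int) (max 0 (PySem.Int.floordiv t 2)) := by omega
        simp only [List.map_cons, List.map_nil, List.foldl_cons, List.foldl_nil, if_neg hlt, hk']

-- ===== VERDICT (by name: the statement is the Claim_ definition above) =====
theorem minOperations_spec : Claim_equal_minOperations := by
  intro n _
  unfold Spec_minOperations minOperations minOperations_alt
  by_cases hn : n ≤ 0
  · simp [PySem.List.pyRange_one_eq_nil (a := 0) (b := n) hn, hn]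
  · have hpos : 0 < n := by omega
    have hcast : ((n.toNat : Int)) = n := Int.toNat_of_nonneg (by omega)
    obtain ⟨h1, h2⟩ := pv_fd2 n
    have hloop := pv_loop n n.toNat
    rw [hcast] at hloop
    have hk : min n (max 0 (PySem.Int.floordiv n 2)) = PySem.Int.floordiv n 2 := by omega
    rw [hk] at hloop
    obtain ⟨h3, h4⟩ := pv_fd2 (n + 1)
    have hq : PySem.Int.floordiv (n + 1) 2 = n - PySem.Int.floordiv n 2 := by omega
    simp only [hloop, if_neg hn, hq]
    ring
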